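-- pv_equiv track=rewrite | github.com/prudentprogrammer/Programming-Challenges-Solutions | uriProblems/Strings/1262 - Multiple Reading.py | get_count
-- ===== SOURCE A (Python) =====
-- def get_count(trace, cc):
--   count = temp = 0
--   for char in trace:
--     if char == 'R':
--       if temp < cc:
--         if temp == 0:
--           count += 1
--         temp += 1
--       else: # temp == cc
--         temp = 1 # Reset cc
--         count += 1
--     else: # if == 'W'
--       count += 1
--       temp = 0
--   return count
-- ===== SOURCE B (Python) =====
-- def get_count(trace, cc):
--     total = 0
--     i = 0
--     n = len(trace)
--     while i < n:
--         # find the maximal run of equal characters starting at i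
--         j = i + 1
--         while j < n and trace[j] == trace[i]:
--             j += 1
--         L = j - i
--         if trace[i] == 'R' and cc >= 1:
--             total += (L + cc - 1) // cc   # ceil(L / cc) readings for a run of R's
--         else:
--             total += L                    # every other char (or cc < 1) counts each char
--         i = j
--     return total
-- ===== Notes on version B (the rewrite author's own statement) =====
-- stated objective: alternative
-- what changed: Replaces the per-character state machine (count,temp) by splitting the trace into maximal runs of equal characters and adding ceil(L/cc) for runs of 'R' (when cc>=1) and L otherwise, in closed form per run.
import Mathlib
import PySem

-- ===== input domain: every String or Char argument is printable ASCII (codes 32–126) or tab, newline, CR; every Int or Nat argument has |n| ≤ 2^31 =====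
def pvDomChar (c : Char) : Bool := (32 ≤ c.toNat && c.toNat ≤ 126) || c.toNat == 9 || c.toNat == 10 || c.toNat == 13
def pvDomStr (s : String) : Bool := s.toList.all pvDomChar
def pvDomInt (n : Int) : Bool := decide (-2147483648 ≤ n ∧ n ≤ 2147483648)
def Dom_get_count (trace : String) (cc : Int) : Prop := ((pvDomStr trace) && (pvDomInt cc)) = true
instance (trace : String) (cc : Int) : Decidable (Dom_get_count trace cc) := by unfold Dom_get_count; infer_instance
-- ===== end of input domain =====

-- B replaces A's per-character (count,temp) state machine by summing, per maximal
-- run of equal characters, a closed-form contribution (ceil(L/cc) for 'R' runs when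
-- cc ≥ 1, else L); alternative decomposition, same cost.


-- ===== PORT A =====
def stepA (cc : Int) (s : Int × Int) (char : Char) : Int × Int :=
  if char = 'R' then
    if s.2 < cc then
      (if s.2 = 0 then s.1 + 1 else s.1, s.2 + 1)
    else
      (s.1 + 1, 1)
  else
    (s.1 + 1, 0)

def get_count (trace : String) (cc : Int) : Int :=
  (trace.toList.foldl (stepA cc) (0, 0)).1

-- ===== PORT B =====
-- process maximal runs of equal characters, one closed-form contribution per run
def altGo (cc : Int) : List Char → Int
  | [] => 0
  | c :: cs =>
    let run := cs.takeWhile (· == c)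
    let rest := cs.dropWhile (· == c)
    let L : Int := (run.length : Int) + 1
    (if c = 'R' ∧ 1 ≤ cc then PySem.Int.floordiv (L + cc - 1) cc else L) + altGo cc rest
termination_by l => l.length
decreasing_by
  have := List.length_dropWhile_le (· == c) cs
  simp only [List.length_cons]
  omega

def get_count_alt (trace : String) (cc : Int) : Int :=
  altGo cc trace.toList

-- ===== PRECONDITION & SPEC =====
def Spec_get_count (trace : String) (cc : Int) (out : Int) : Prop := out = get_count_alt trace cc
instance (trace : String) (cc : Int) (out : Int) : Decidable (Spec_get_count trace cc out) := by unfold Spec_get_count; infer_instance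

-- ===== CLAIM (what is proved, stated in full; the proofs are below) =====
def Claim_equal_get_count : Prop := ∀ (trace : String) (cc : Int), Dom_get_count trace cc → Spec_get_count trace cc (get_count trace cc)

-- ===== LEMMAS AND PROOFS =====

-- A run of k 'R's with cc ≥ 1 starting from temp t, 1 ≤ t ≤ cc: count grows by (k+t-1)/cc
lemma foldA_R_run_pos (cc : Int) (hcc : 1 ≤ cc) :
    ∀ (k : Nat) (count t : Int), 1 ≤ t → t ≤ cc →
      ∃ t', (List.replicate k 'R').foldl (stepA cc) (count, t)
        = (count + ((k : Int) + t - 1) / cc, t') := by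
  intro k
  induction k with
  | zero =>
      intro count t h1 h2
      refine ⟨t, ?_⟩
      simp only [List.replicate, List.foldl_nil]
      have hdiv : (((0:Nat) : Int) + t - 1) / cc = 0 :=
        Int.ediv_eq_zero_of_lt (by omega) (by omega)
      rw [hdiv]
      simp
  | succ k ih =>
      intro count t h1 h2
      simp only [List.replicate, List.foldl_cons]
      by_cases hlt : t < cc
      · have hstep : stepA cc (count, t) 'R' = (count, t + 1) := by
          simp [stepA, hlt, show t ≠ 0 by omega]
        obtain ⟨t', ht'⟩ := ih count (t + 1) (by omega) (by omega)
        refine ⟨t', ?_⟩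
        rw [hstep, ht']
        have harg : (k : Int) + (t + 1) - 1 = ((k:Nat) + 1 : Nat) + t - 1 := by
          push_cast; ring
        rw [harg]
      · have ht : t = cc := le_antisymm h2 (by omega)
        have hstep : stepA cc (count, t) 'R' = (count + 1, 1) := by
          simp [stepA, hlt]
        obtain ⟨t', ht'⟩ := ih (count + 1) 1 (by omega) hcc
        refine ⟨t', ?_⟩
        rw [hstep, ht']
        have hdiv : (((k : Nat) + 1 : Nat) : Int) + t - 1 = (k : Int) + 1 * cc := by
          rw [ht]; push_cast; ring
        rw [hdiv, Int.add_mul_ediv_right _ _ (show cc ≠ 0 by omega)]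
        have : (k : Int) + 1 - 1 = (k : Int) := by ring
        rw [this]
        congr 1
        ring

-- A run of k 'R's with cc ≤ 0: every 'R' counts
lemma foldA_R_run_nonpos (cc : Int) (hcc : cc ≤ 0) :
    ∀ (k : Nat) (count t : Int), 0 ≤ t →
      ((List.replicate k 'R').foldl (stepA cc) (count, t)).1 = count + k := by
  intro k
  induction k with
  | zero => intro count t _; simp
  | succ k ih =>
      intro count t ht
      simp only [List.replicate, List.foldl_cons]
      have hstep : stepA cc (count, t) 'R' = (count + 1, 1) := by
        simp [stepA, show ¬ t < cc by omega]
      rw [hstep, ih (count + 1) 1 (by omega)]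
      push_cast
      ring

-- A run of non-'R' characters starting from temp 0: each char counts, temp stays 0
lemma foldA_W_run (cc : Int) :
    ∀ (xs : List Char), (∀ x ∈ xs, x ≠ 'R') → ∀ (count : Int),
      xs.foldl (stepA cc) (count, 0) = (count + xs.length, 0) := by
  intro xs
  induction xs with
  | nil => intro _ count; simp
  | cons x xs ih =>
      intro hx count
      have hxR : x ≠ 'R' := hx x (by simp)
      simp only [List.foldl_cons]
      have hstep : stepA cc (count, 0) x = (count + 1, 0) := by
        simp [stepA, hxR]
      rw [hstep, ih (fun y hy => hx y (by simp [hy])) (count + 1)]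
      simp only [Prod.mk.injEq, List.length_cons]
      push_cast
      constructor
      · ring
      · trivial

lemma altGo_cons (cc : Int) (c : Char) (cs : List Char) :
    altGo cc (c :: cs) =
      (if c = 'R' ∧ 1 ≤ cc
        then PySem.Int.floordiv (((cs.takeWhile (· == c)).length : Int) + 1 + cc - 1) cc
        else ((cs.takeWhile (· == c)).length : Int) + 1)
      + altGo cc (cs.dropWhile (· == c)) := by
  rw [altGo]

-- main invariant: from any state whose temp is 0 whenever the list starts with 'R'
lemma main_inv (cc : Int) :
    ∀ (n : Nat) (cs : List Char), cs.length ≤ n → ∀ (count t : Int),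
      (∀ c, cs.head? = some c → c = 'R' → t = 0) →
      (cs.foldl (stepA cc) (count, t)).1 = count + altGo cc cs := by
  intro n
  induction n with
  | zero =>
      intro cs hlen count t _
      have : cs = [] := List.length_eq_zero_iff.mp (Nat.le_zero.mp hlen)
      subst this
      simp [altGo]
  | succ n ih =>
      intro cs hlen count t hhead
      cases cs with
      | nil => simp [altGo]
      | cons c cs' =>
        have hsplit : cs' = cs'.takeWhile (· == c) ++ cs'.dropWhile (· == c) :=
          (List.takeWhile_append_dropWhile).symm
        have hrestlen : (cs'.dropWhile (· == c)).length ≤ n := by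
          have := List.length_dropWhile_le (· == c) cs'
          simp only [List.length_cons] at hlen
          omega
        have hresthead : ∀ d, (cs'.dropWhile (· == c)).head? = some d → d = c → False := by
          intro d hd hdc
          have := List.head?_dropWhile_not (· == c) cs'
          rw [hd] at this
          simp at this
          exact this hdc
        have hruneq : ∀ x ∈ cs'.takeWhile (· == c), x = c := by
          intro x hx
          have := List.mem_takeWhile_imp hx
          simpa using this
        rw [altGo_cons]
        by_cases hcR : c = 'R'
        · -- a run of 'R's
          have ht0 : t = 0 := hhead c (by simp) hcR
          subst ht0
          subst hcR
          have hrun : 'R' :: cs'.takeWhile (· == 'R')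
              = List.replicate ((cs'.takeWhile (· == 'R')).length + 1) 'R' := by
            have := List.eq_replicate_of_mem (l := cs'.takeWhile (· == 'R')) (a := 'R') hruneq
            rw [List.replicate_succ]
            exact congrArg (List.cons 'R') this
          have hfold : ('R' :: cs').foldl (stepA cc) (count, 0)
              = (cs'.dropWhile (· == 'R')).foldl (stepA cc)
                  ((List.replicate ((cs'.takeWhile (· == 'R')).length + 1) 'R').foldl
                    (stepA cc) (count, 0)) := by
            conv_lhs => rw [show ('R' :: cs') = ('R' :: cs'.takeWhile (· == 'R')) ++ cs'.dropWhile (· == 'R') by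
              rw [List.cons_append]; exact congrArg (List.cons 'R') hsplit]
            rw [List.foldl_append, hrun]
          rw [hfold]
          by_cases hcc : 1 ≤ cc
          · -- first R step from temp 0, then the run lemma from temp 1
            have hfold2 : (List.replicate ((cs'.takeWhile (· == 'R')).length + 1) 'R').foldl
                  (stepA cc) (count, 0)
                = (List.replicate (cs'.takeWhile (· == 'R')).length 'R').foldl
                  (stepA cc) (count + 1, 1) := by
              rw [List.replicate_succ, List.foldl_cons]
              congr 1
              simp [stepA, show (0:Int) < cc by omega]
            obtain ⟨t', ht'⟩ := foldA_R_run_pos cc hcc (cs'.takeWhile (· == 'R')).length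
              (count + 1) 1 (le_refl 1) hcc
            rw [hfold2, ht']
            rw [ih (cs'.dropWhile (· == 'R')) hrestlen _ t'
              (fun d hd hdR => absurd hdR (fun h => hresthead d hd h))]
            rw [if_pos ⟨rfl, hcc⟩]
            rw [PySem.Int.floordiv_eq_ediv_of_pos (by omega)]
            have harg : ((cs'.takeWhile (· == 'R')).length : Int) + 1 + cc - 1
                = ((cs'.takeWhile (· == 'R')).length : Int) + 1 * cc := by ring
            rw [harg, Int.add_mul_ediv_right _ _ (show cc ≠ 0 by omega)]
            have harg2 : ((cs'.takeWhile (· == 'R')).length : Int) + 1 - 1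
                = ((cs'.takeWhile (· == 'R')).length : Int) := by ring
            rw [harg2]
            ring
          · -- cc ≤ 0: every character counts
            have hcc' : cc ≤ 0 := by omega
            have hfold3 := foldA_R_run_nonpos cc hcc'
              ((cs'.takeWhile (· == 'R')).length + 1) count 0 (le_refl 0)
            set s := (List.replicate ((cs'.takeWhile (· == 'R')).length + 1) 'R').foldl
              (stepA cc) (count, 0) with hs
            rw [show s = (s.1, s.2) from rfl]
            rw [ih (cs'.dropWhile (· == 'R')) hrestlen s.1 s.2
              (fun d hd hdR => absurd hdR (fun h => hresthead d hd h))]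
            rw [hfold3]
            rw [if_neg (by intro h; exact hcc h.2)]
            push_cast
            ring
        · -- a run of non-'R' characters: temp after the first step is 0
          have hfold : (c :: cs').foldl (stepA cc) (count, t)
              = (cs'.dropWhile (· == c)).foldl (stepA cc)
                  ((cs'.takeWhile (· == c)).foldl (stepA cc) (count + 1, 0)) := by
            conv_lhs => rw [show (c :: cs') = (c :: cs'.takeWhile (· == c)) ++ cs'.dropWhile (· == c) by
              rw [List.cons_append]; exact congrArg (List.cons c) hsplit]
            rw [List.foldl_append, List.foldl_cons]
            congr 2
            simp [stepA, hcR]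
          rw [hfold,
            foldA_W_run cc (cs'.takeWhile (· == c))
              (fun x hx => fun hR => hcR ((hruneq x hx).symm.trans hR)) (count + 1)]
          rw [ih (cs'.dropWhile (· == c)) hrestlen
                (count + 1 + ((cs'.takeWhile (· == c)).length : Int)) 0
                (fun d hd hdR => rfl)]
          rw [if_neg (by intro h; exact hcR h.1)]
          ring

-- ===== VERDICT (by name: the statement is the Claim_ definition above) =====
theorem get_count_spec : Claim_equal_get_count := by
  intro trace cc _
  unfold Spec_get_count get_count get_count_alt
  have := main_inv cc trace.toList.length trace.toList (le_refl _) 0 0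
    (fun c _ _ => rfl)
  rw [this]
  ring
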